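-- pv_equiv track=rewrite | github.com/nickgreenquist/InterviewPrep | LeetCode/Medium/sudoku_validator.py | checkRows
-- ===== SOURCE A (Python) =====
-- def checkRows(board):
--     rows = len(board)
--     cols = len(board[0])
--     for i in range(rows):
--         seen = set()
--         for j in range(cols):
--             if board[i][j] == '.':
--                 continue
--             if board[i][j] in seen:
--                 return False
--             seen.add(board[i][j])
--     return True
-- ===== SOURCE B (Python) =====
-- def checkRows(board):
--     rows = len(board)
--     cols = len(board[0])
--     for i in range(rows):
--         digits = sorted(board[i][j] for j in range(cols) if board[i][j] != '.')
--         for a, b in zip(digits, digits[1:]):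
--             if a == b:
--                 return False
--     return True
-- ===== Notes on version B (the rewrite author's own statement) =====
-- stated objective: alternative
-- what changed: Duplicate detection by sorting instead of a set: each row's non-'.' cells are sorted and adjacent pairs are compared for equality, so no membership structure is maintained at all.
-- outside the precondition, e.g. on checkRows([['1', '2', '3'], ['2', '2']]): A returns False, B raises IndexError
import Mathlib
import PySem

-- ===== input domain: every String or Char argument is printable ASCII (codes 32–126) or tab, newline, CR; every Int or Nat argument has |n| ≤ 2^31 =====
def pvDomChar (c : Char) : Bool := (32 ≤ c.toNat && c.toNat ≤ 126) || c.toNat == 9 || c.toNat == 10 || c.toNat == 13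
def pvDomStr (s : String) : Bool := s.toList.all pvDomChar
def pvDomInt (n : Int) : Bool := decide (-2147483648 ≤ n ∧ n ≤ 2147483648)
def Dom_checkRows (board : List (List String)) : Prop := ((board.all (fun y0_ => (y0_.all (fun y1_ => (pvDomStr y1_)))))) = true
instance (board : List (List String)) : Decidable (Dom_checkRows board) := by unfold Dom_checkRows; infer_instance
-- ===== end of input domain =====

-- B detects duplicates by sorting each row's non-'.' cells and scanning adjacent pairs, instead of A's seen-set.

-- ===== PORT A =====
-- inner loop: for j in range(cols): skip '.', early-return False on a repeat, else add to seen
def checkRowsInner (row : List String) (js : List Int) (seen : PySem.Set String) : Bool :=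
  match js with
  | [] => true
  | j :: js' =>
    let c := PySem.List.pyGetD row j ""
    if c = "." then checkRowsInner row js' seen
    else if PySem.Set.contains seen c then false
    else checkRowsInner row js' (PySem.Set.add seen c)

-- outer loop: for i in range(rows), fresh seen per row, early return False
def checkRowsOuter (board : List (List String)) (cols : Int) (is : List Int) : Bool :=
  match is with
  | [] => true
  | i :: is' =>
    if checkRowsInner (PySem.List.pyGetD board i []) (PySem.List.pyRange 0 cols 1) PySem.Set.empty
    then checkRowsOuter board cols is'
    else false

def checkRows (board : List (List String)) : Bool :=
  let rows := PySem.List.len board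
  let cols := PySem.List.len (PySem.List.pyGetD board 0 [])
  checkRowsOuter board cols (PySem.List.pyRange 0 rows 1)

-- ===== PORT B =====
-- the generator: board[i][j] for j in range(cols) if board[i][j] != '.'
def rowDigits (row : List String) (js : List Int) : List String :=
  js.filterMap (fun j =>
    let c := PySem.List.pyGetD row j ""
    if c = "." then none else some c)

-- for a, b in zip(digits, digits[1:]): if a == b: return False
def adjDup (ds : List String) : Bool :=
  match ds with
  | a :: b :: t => if a = b then true else adjDup (b :: t)
  | _ => false

-- for i in range(rows): digits = sorted(...); adjacent-pair scan
def checkRowsAltOuter (board : List (List String)) (cols : Int) (is : List Int) : Bool :=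
  match is with
  | [] => true
  | i :: is' =>
    let ds := PySem.List.sorted (rowDigits (PySem.List.pyGetD board i []) (PySem.List.pyRange 0 cols 1)) (fun x => x) false
    if adjDup ds then false
    else checkRowsAltOuter board cols is'

def checkRows_alt (board : List (List String)) : Bool :=
  let rows := PySem.List.len board
  let cols := PySem.List.len (PySem.List.pyGetD board 0 [])
  checkRowsAltOuter board cols (PySem.List.pyRange 0 rows 1)

-- ===== PRECONDITION & SPEC =====
-- Pre_ excludes empty boards and ragged boards (some row shorter than the first row): there A
-- raises IndexError, except when a duplicate happens to occur before the short spot — an accident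
-- of A's early exit; B raises IndexError on those boards too.
def Pre_checkRows (board : List (List String)) : Prop :=
  board ≠ [] ∧ ∀ row ∈ board, (board.headD []).length ≤ row.length
instance (board : List (List String)) : Decidable (Pre_checkRows board) := by
  unfold Pre_checkRows; infer_instance
def pvWitness_checkRows : List (List String) := [["5", "."], [".", "5"]]

def Spec_checkRows (board : List (List String)) (out : Bool) : Prop := out = checkRows_alt board
instance (board : List (List String)) (out : Bool) : Decidable (Spec_checkRows board out) := by
  unfold Spec_checkRows; infer_instance

-- ===== CLAIM (what is proved, stated in full; the proofs are below) =====
def Claim_equal_checkRows : Prop := ∀ (board : List (List String)), Dom_checkRows board → Pre_checkRows board → Spec_checkRows board (checkRows board)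

-- ===== LEMMAS AND PROOFS =====

theorem rowDigits_cons (row : List String) (j : Int) (js : List Int) :
    rowDigits row (j :: js) =
      (if PySem.List.pyGetD row j "" = "." then rowDigits row js
       else PySem.List.pyGetD row j "" :: rowDigits row js) := by
  by_cases h : PySem.List.pyGetD row j "" = "." <;>
    simp [rowDigits, h]

-- A's inner scan succeeds iff the collected digits are duplicate-free and disjoint from seen
theorem checkRowsInner_iff (row : List String) (js : List Int) (seen : PySem.Set String) :
    checkRowsInner row js seen = true ↔
      (rowDigits row js).Nodup ∧ ∀ x ∈ rowDigits row js, x ∉ seen := by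
  induction js generalizing seen with
  | nil => simp [checkRowsInner, rowDigits]
  | cons j js ih =>
    rw [checkRowsInner, rowDigits_cons]
    by_cases hdot : PySem.List.pyGetD row j "" = "."
    · simp only [hdot, if_true]; exact ih seen
    · simp only [hdot, if_false]
      set c := PySem.List.pyGetD row j "" with hc
      by_cases hmem : PySem.Set.contains seen c
      · simp only [hmem, if_true]
        have : c ∈ seen := List.contains_iff_mem.mp hmem
        constructor
        · intro h; simp at h
        · rintro ⟨-, hall⟩
          exact absurd this (hall c (by simp))
      · rw [if_neg (by simpa using hmem)]
        have hcs : c ∉ seen := by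
          intro h
          exact hmem (List.contains_iff_mem.mpr h)
        rw [ih (PySem.Set.add seen c)]
        constructor
        · rintro ⟨hnd, hall⟩
          have hcm : c ∉ rowDigits row js := by
            intro h
            exact hall c h ((PySem.Set.mem_add seen c c).mpr (Or.inr rfl))
          refine ⟨List.nodup_cons.mpr ⟨hcm, hnd⟩, ?_⟩
          intro x hx
          rcases List.mem_cons.mp hx with h | h
          · exact h ▸ hcs
          · intro hxs
            exact hall x h ((PySem.Set.mem_add seen c x).mpr (Or.inl hxs))
        · rintro ⟨hnd, hall⟩
          rcases List.nodup_cons.mp hnd with ⟨hcm, hnd'⟩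
          refine ⟨hnd', ?_⟩
          intro x hx hxs
          rcases (PySem.Set.mem_add seen c x).mp hxs with h | h
          · exact hall x (by simp [hx]) h
          · exact hcm (h ▸ hx)

-- on a (≤)-sorted list, no adjacent duplicate is exactly Nodup
theorem adjDup_false_iff_nodup (l : List String) (h : l.Pairwise (· ≤ ·)) :
    adjDup l = false ↔ l.Nodup := by
  induction l with
  | nil => simp [adjDup]
  | cons a t ih =>
    cases t with
    | nil => simp [adjDup]
    | cons b t' =>
      rcases List.pairwise_cons.mp h with ⟨hab, ht⟩
      rw [adjDup]
      by_cases hd : a = b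
      · simp only [hd, if_true]
        constructor
        · intro h'; simp at h'
        · intro hnd
          exact ((List.nodup_cons.mp hnd).1 (hd ▸ List.mem_cons_self)).elim
      · rw [if_neg hd, ih ht]
        constructor
        · intro hnd
          refine List.nodup_cons.mpr ⟨?_, hnd⟩
          intro hmem
          rcases List.mem_cons.mp hmem with h' | h'
          · exact hd h'
          · have hab' : a < b := lt_of_le_of_ne (hab b (by simp)) hd
            have hbx : b ≤ a := (List.pairwise_cons.mp ht).1 a h'
            exact absurd hbx (not_le.mpr hab')
        · intro hnd
          exact (List.nodup_cons.mp hnd).2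

-- B's per-row test agrees with A's inner scan
theorem row_tests_agree (row : List String) (js : List Int) :
    checkRowsInner row js PySem.Set.empty =
      !adjDup (PySem.List.sorted (rowDigits row js) (fun x => x) false) := by
  have h1 := checkRowsInner_iff row js PySem.Set.empty
  have hperm : (PySem.List.sorted (rowDigits row js) (fun x => x) false).Perm (rowDigits row js) :=
    PySem.List.sorted_perm _ _ _
  have hpw : (PySem.List.sorted (rowDigits row js) (fun x => x) false).Pairwise (· ≤ ·) := by
    simpa using PySem.List.sorted_pairwise (rowDigits row js) (fun x => x)
  have h2 := adjDup_false_iff_nodup _ hpw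
  rw [hperm.nodup_iff] at h2
  simp only [PySem.Set.empty, List.not_mem_nil, not_false_iff, imp_true_iff, and_true] at h1
  cases hB : checkRowsInner row js PySem.Set.empty with
  | true =>
    have := h1.mp (by simpa [PySem.Set.empty] using hB)
    rw [h2.mpr this]
    rfl
  | false =>
    have hnd : ¬ (rowDigits row js).Nodup := by
      intro h
      have hB' : checkRowsInner row js [] = false := hB
      have := h1.mpr h
      simp [hB'] at this
    cases hA : adjDup (PySem.List.sorted (rowDigits row js) (fun x => x) false) with
    | true => rfl
    | false => exact absurd (h2.mp hA) hnd

theorem outers_agree (board : List (List String)) (cols : Int) (is : List Int) :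
    checkRowsOuter board cols is = checkRowsAltOuter board cols is := by
  induction is with
  | nil => rfl
  | cons i is ih =>
    rw [checkRowsOuter, checkRowsAltOuter]
    rw [row_tests_agree]
    split <;> rename_i h
    · rw [if_neg (by simpa using h), ih]
    · rw [if_pos (by simpa using h)]

-- ===== VERDICT (by name: the statement is the Claim_ definition above) =====
theorem checkRows_spec : Claim_equal_checkRows := by
  intro board _ _
  unfold Spec_checkRows checkRows checkRows_alt
  exact outers_agree _ _ _
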